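-- pv_equiv track=rewrite | github.com/alright212/ITI0102_2022 | KT/kt1/exam.py | has_seven
-- ===== SOURCE A (Python) =====
-- def has_seven(nums):
--     """
--     Whether the list has three 7s and no repeated consecutive elements.
--
--     Given a list if ints, return True if the value 7 appears in the list exactly 3 times
--     and no consecutive elements have the same value.
--
--     has_seven([1, 2, 3]) => False
--     has_seven([7, 1, 7, 7]) => False
--     has_seven([7, 1, 7, 1, 7]) => True
--     has_seven([7, 1, 7, 1, 1, 7]) => False
--     """
--     consecutive_elements = False
--     count = 0
--     for i in range(len(nums)):
--         if nums[i] == 7: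
--             count += 1
--         if i != 0 and nums[i] == nums[i - 1]:
--             consecutive_elements = True
--     if count == 3 and consecutive_elements is False:
--         return True
--     else:
--         return False
-- ===== SOURCE B (Python) =====
-- def has_seven(nums):
--     # Group indices by value, then judge: the 7-group must have size 3, and
--     # within every group no two stored indices may be consecutive.
--     positions = {}
--     for i, x in enumerate(nums):
--         positions.setdefault(x, []).append(i)
--     if len(positions.get(7, [])) != 3:
--         return False
--     return all(b - a > 1
--                for idxs in positions.values()
--                for a, b in zip(idxs, idxs[1:]))
-- ===== Notes on version B (the rewrite author's own statement) =====
-- stated objective: alternative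
-- what changed: Replaces A's single index loop (running 7-count plus an i-vs-i-1 duplicate flag) by a dictionary that groups each value's index positions, then judges the grouped index lists: the 7-group must have length 3 and no group may contain two consecutive indices.
import Mathlib
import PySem

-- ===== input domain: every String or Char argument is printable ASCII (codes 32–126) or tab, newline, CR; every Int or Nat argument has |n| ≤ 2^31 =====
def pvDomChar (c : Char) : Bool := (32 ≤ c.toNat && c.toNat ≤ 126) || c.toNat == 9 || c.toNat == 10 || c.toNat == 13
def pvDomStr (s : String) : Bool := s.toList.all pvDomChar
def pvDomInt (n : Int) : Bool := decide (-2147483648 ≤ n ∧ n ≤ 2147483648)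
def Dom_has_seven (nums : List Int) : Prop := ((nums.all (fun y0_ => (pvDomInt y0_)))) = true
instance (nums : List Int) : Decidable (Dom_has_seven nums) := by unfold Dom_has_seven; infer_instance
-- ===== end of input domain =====

-- B replaces A's single fused index loop (running 7-count plus an i-vs-i-1 flag) by a dictionary
-- grouping each value's index positions, judged afterwards; same O(n) cost, alternative algorithm.

-- ===== PORT A =====
-- A's single loop over range(len(nums)) carrying (consecutive_elements, count); indices are always in range so pyGetD is exact.
def has_seven (nums : List Int) : Bool :=
  let r := (PySem.List.pyRange 0 nums.length).foldl
    (fun (s : Bool × Int) i =>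
      let count := if PySem.List.pyGetD nums i 0 = 7 then s.2 + 1 else s.2
      let consec := if i ≠ 0 ∧ PySem.List.pyGetD nums i 0 = PySem.List.pyGetD nums (i - 1) 0 then true else s.1
      (consec, count))
    (false, 0)
  if r.2 = 3 ∧ r.1 = false then true else false

-- ===== PORT B =====
-- Source B: positions = {}; for i, x in enumerate(nums): positions.setdefault(x, []).append(i)
-- (setdefault-then-append sets positions[x] = positions.get(x, []) + [i], i.e. Dict.modify);
-- then len(positions.get(7, [])) must be 3 and every stored index list must have all gaps > 1.
def has_seven_alt (nums : List Int) : Bool :=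
  let positions : PySem.Dict Int (List Int) :=
    (PySem.List.enumerate nums).foldl
      (fun d p => d.modify p.2 [] (fun l => l ++ [p.1])) PySem.Dict.empty
  if (positions.getD 7 []).length ≠ 3 then false
  else (PySem.Dict.values positions).all
    (fun idxs => ((idxs.zip (PySem.List.slice idxs (some 1) none)).all
      (fun p => decide (p.2 - p.1 > 1))))

-- ===== PRECONDITION & SPEC =====
def Spec_has_seven (nums : List Int) (out : Bool) : Prop := out = has_seven_alt nums
instance (nums : List Int) (out : Bool) : Decidable (Spec_has_seven nums out) := by unfold Spec_has_seven; infer_instance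

-- ===== CLAIM (what is proved, stated in full; the proofs are below) =====
def Claim_equal_has_seven : Prop := ∀ (nums : List Int), Dom_has_seven nums → Spec_has_seven nums (has_seven nums)

-- ===== LEMMAS AND PROOFS =====

-- adjacent-duplicate test (the value A's flag computes)
def pvAdj (nums : List Int) : Bool :=
  (nums.zip nums.tail).any (fun p => p.1 == p.2)

-- the index list B's dictionary stores under key v
def pvGroup (nums : List Int) (v : Int) : List Int :=
  ((PySem.List.enumerate nums).filter (fun p => p.2 == v)).map (fun p => p.1)

-- B's per-group gap test
def pvGapOK (g : List Int) : Bool :=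
  (g.zip g.tail).all (fun p => decide (p.2 - p.1 > 1))

-- ---- A-side characterisation (loop state = (adjacent flag, running count)) ----

lemma pvAdj_append (ns : List Int) (x : Int) :
    pvAdj (ns ++ [x]) = (pvAdj ns || (decide (ns ≠ []) && decide (ns.getLast? = some x))) := by
  induction ns with
  | nil => simp [pvAdj]
  | cons a t ih =>
    cases t with
    | nil => by_cases h : a = x <;> simp [pvAdj, h]
    | cons b t' =>
      simp only [pvAdj, List.cons_append, List.tail_cons, List.zip_cons_cons, List.any_cons] at ih ⊢
      rw [ih]
      simp [Bool.or_assoc]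

lemma count_append_singleton (ns : List Int) (x : Int) :
    (PySem.List.count (ns ++ [x]) 7 : Int)
      = (if x = 7 then (PySem.List.count ns 7 : Int) + 1 else (PySem.List.count ns 7 : Int)) := by
  by_cases h : x = 7 <;> simp [PySem.List.count, List.count_append, h]

lemma loop_char (nums : List Int) :
    (PySem.List.pyRange 0 nums.length).foldl
      (fun (s : Bool × Int) i =>
        let count := if PySem.List.pyGetD nums i 0 = 7 then s.2 + 1 else s.2
        let consec := if i ≠ 0 ∧ PySem.List.pyGetD nums i 0 = PySem.List.pyGetD nums (i - 1) 0 then true else s.1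
        (consec, count))
      (false, 0)
    = (pvAdj nums, (PySem.List.count nums 7 : Int)) := by
  induction nums using List.reverseRecOn with
  | nil => simp [pvAdj, PySem.List.count]
  | append_singleton ns x ih =>
    have hlen : ((ns ++ [x]).length : Int) = (ns.length : Int) + 1 := by simp
    rw [hlen, PySem.List.pyRange_one_succ_right (by positivity), List.foldl_append]
    have hcongr :
        (PySem.List.pyRange 0 (ns.length : Int)).foldl
          (fun (s : Bool × Int) i =>
            let count := if PySem.List.pyGetD (ns ++ [x]) i 0 = 7 then s.2 + 1 else s.2
            let consec := if i ≠ 0 ∧ PySem.List.pyGetD (ns ++ [x]) i 0 = PySem.List.pyGetD (ns ++ [x]) (i - 1) 0 then true else s.1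
            (consec, count))
          (false, 0)
        = (PySem.List.pyRange 0 (ns.length : Int)).foldl
          (fun (s : Bool × Int) i =>
            let count := if PySem.List.pyGetD ns i 0 = 7 then s.2 + 1 else s.2
            let consec := if i ≠ 0 ∧ PySem.List.pyGetD ns i 0 = PySem.List.pyGetD ns (i - 1) 0 then true else s.1
            (consec, count))
          (false, 0) := by
      apply PySem.List.foldl_congr_mem
      intro acc i hi
      have hi' := PySem.List.mem_pyRange_one.mp hi
      have hget : ∀ j : Int, 0 ≤ j → j < (ns.length : Int) →
          PySem.List.pyGetD (ns ++ [x]) j 0 = PySem.List.pyGetD ns j 0 := by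
        intro j h0 h1
        rw [PySem.List.pyGetD_eq_getElem _ _ h0 (by rw [List.length_append]; push_cast; omega),
            PySem.List.pyGetD_eq_getElem _ _ h0 (by exact_mod_cast h1)]
        rw [List.getElem_append_left (by omega)]
      by_cases h0 : i = 0
      · subst h0
        simp [hget 0 le_rfl (by omega)]
      · rw [hget i hi'.1 hi'.2, hget (i - 1) (by omega) (by omega)]
    rw [hcongr, ih]
    simp only [List.foldl_cons, List.foldl_nil]
    by_cases hnil : ns = []
    · subst hnil
      by_cases h7 : x = 7 <;>
        simp [pvAdj, PySem.List.count, PySem.List.pyGetD_zero_cons, h7]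
    · have hlen0 : 0 < ns.length := List.length_pos_iff.mpr hnil
      have hlast : PySem.List.pyGetD (ns ++ [x]) ((ns.length : Int)) 0 = x := by
        rw [PySem.List.pyGetD_eq_getElem (ns ++ [x]) (i := (ns.length : Int)) 0 (by positivity)
              (by rw [List.length_append]; push_cast [List.length_singleton]; omega)]
        simp
      have hprev : PySem.List.pyGetD (ns ++ [x]) ((ns.length : Int) - 1) 0 = ns.getLast hnil := by
        rw [PySem.List.pyGetD_eq_getElem (ns ++ [x]) (i := (ns.length : Int) - 1) 0 (by omega)
              (by rw [List.length_append]; push_cast [List.length_singleton]; omega)]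
        simp only [show ((ns.length : Int) - 1).toNat = ns.length - 1 from by omega]
        rw [List.getElem_append_left (by omega), List.getLast_eq_getElem]
      have hne0 : ((ns.length : Int)) ≠ 0 := by
        omega
      rw [hlast, hprev, pvAdj_append, count_append_singleton]
      have hgl : ns.getLast? = some (ns.getLast hnil) := List.getLast?_eq_some_getLast hnil
      by_cases hdup : x = ns.getLast hnil <;>
        simp [hdup, hnil, hgl, eq_comm]

-- ---- general zip-with-tail facts ----

lemma mem_zip_tail_iff (l : List Int) (p : Int × Int) :
    p ∈ l.zip l.tail ↔ ∃ k : Nat, ∃ _ : k + 1 < l.length, p = (l[k], l[k + 1]) := by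
  constructor
  · intro h
    obtain ⟨k, hk, he⟩ := List.mem_iff_getElem.mp h
    rw [List.length_zip, List.length_tail] at hk
    refine ⟨k, by omega, ?_⟩
    rw [List.getElem_zip, List.getElem_tail] at he
    exact he.symm
  · rintro ⟨k, hk, rfl⟩
    apply List.mem_iff_getElem.mpr
    refine ⟨k, by rw [List.length_zip, List.length_tail]; omega, ?_⟩
    rw [List.getElem_zip, List.getElem_tail]

lemma zip_tail_mem_of_sorted (g : List Int) (hs : g.Pairwise (· < ·)) (a b : Int)
    (ha : a ∈ g) (hb : b ∈ g) (hab : a < b)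
    (hbetween : ∀ z ∈ g, ¬ (a < z ∧ z < b)) :
    (a, b) ∈ g.zip g.tail := by
  induction g with
  | nil => cases ha
  | cons x t ih =>
    have hxt : ∀ z ∈ t, x < z := (List.pairwise_cons.mp hs).1
    have hst : t.Pairwise (· < ·) := (List.pairwise_cons.mp hs).2
    by_cases hax : a = x
    · subst hax
      have hbt : b ∈ t := by
        rcases List.mem_cons.mp hb with h | h
        · omega
        · exact h
      cases t with
      | nil => cases hbt
      | cons y t' =>
        have hay : a < y := hxt y List.mem_cons_self
        have hby : b = y := by
          rcases List.mem_cons.mp hbt with h | h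
          · exact h
          · exfalso
            exact hbetween y (by simp) ⟨hay, (List.pairwise_cons.mp hst).1 b h⟩
        subst hby
        simp [List.zip_cons_cons]
    · have hat : a ∈ t := by
        rcases List.mem_cons.mp ha with h | h
        · exact absurd h hax
        · exact h
      have hbt : b ∈ t := by
        rcases List.mem_cons.mp hb with h | h
        · exfalso; have := hxt a hat; omega
        · exact h
      have hmem := ih hst hat hbt (fun z hz => hbetween z (List.mem_cons_of_mem x hz))
      cases t with
      | nil => cases hat
      | cons y t' =>
        simp only [List.tail_cons, List.zip_cons_cons, List.mem_cons] at hmem ⊢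
        right; exact hmem
    
lemma zip_tail_sorted_facts (g : List Int) (hs : g.Pairwise (· < ·)) (a b : Int)
    (h : (a, b) ∈ g.zip g.tail) : a ∈ g ∧ b ∈ g ∧ a < b := by
  induction g with
  | nil => simp [List.zip] at h
  | cons x t ih =>
    have hxt : ∀ z ∈ t, x < z := (List.pairwise_cons.mp hs).1
    have hst : t.Pairwise (· < ·) := (List.pairwise_cons.mp hs).2
    cases t with
    | nil => simp [List.zip] at h
    | cons y t' =>
      simp only [List.tail_cons, List.zip_cons_cons, List.mem_cons, Prod.mk.injEq] at h
      rcases h with ⟨rfl, rfl⟩ | h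
      · exact ⟨List.mem_cons_self, List.mem_cons_of_mem _ List.mem_cons_self,
          hxt b List.mem_cons_self⟩
      · have := ih hst h
        exact ⟨List.mem_cons_of_mem _ this.1, List.mem_cons_of_mem _ this.2.1, this.2.2⟩

-- ---- characterisation of B's groups ----

lemma mem_pvGroup (nums : List Int) (v a : Int) :
    a ∈ pvGroup nums v ↔ ∃ k : Nat, ∃ _ : k < nums.length, a = (k : Int) ∧ nums[k] = v := by
  unfold pvGroup
  simp only [List.mem_map, List.mem_filter]
  constructor
  · rintro ⟨p, ⟨hp, hv⟩, rfl⟩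
    obtain ⟨k, hk, rfl⟩ := (PySem.List.mem_enumerate_iff _ _ _).mp hp
    exact ⟨k, hk, by simpa using (by simpa using hv : nums[k] = v)⟩
  · rintro ⟨k, hk, rfl, hv⟩
    exact ⟨((k : Int), nums[k]), ⟨(PySem.List.mem_enumerate_iff _ _ _).mpr ⟨k, hk, by simp⟩, by simpa⟩, rfl⟩

lemma pvGroup_sorted (nums : List Int) (v : Int) :
    (pvGroup nums v).Pairwise (· < ·) := by
  unfold pvGroup
  apply List.Pairwise.map
  · exact fun p q h => h
  · exact (PySem.List.pairwise_lt_enumerate nums 0).filter _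

lemma pvAdj_iff (nums : List Int) :
    pvAdj nums = true ↔ ∃ k : Nat, ∃ _ : k + 1 < nums.length, nums[k] = nums[k + 1] := by
  unfold pvAdj
  rw [List.any_eq_true]
  constructor
  · rintro ⟨p, hp, he⟩
    obtain ⟨k, hk, rfl⟩ := (mem_zip_tail_iff nums p).mp hp
    exact ⟨k, hk, by simpa using he⟩
  · rintro ⟨k, hk, he⟩
    exact ⟨(nums[k], nums[k + 1]), (mem_zip_tail_iff nums _).mpr ⟨k, hk, rfl⟩, by simpa using he⟩

-- the heart: every group passes the gap test iff there is no adjacent duplicate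
lemma groups_gap_iff (nums : List Int) :
    (∀ v ∈ nums, pvGapOK (pvGroup nums v) = true) ↔ pvAdj nums = false := by
  constructor
  · intro hall
    by_contra hne
    have htrue : pvAdj nums = true := by
      cases h : pvAdj nums
      · exact absurd h hne
      · rfl
    obtain ⟨k, hk, he⟩ := (pvAdj_iff nums).mp htrue
    set v := nums[k + 1] with hv
    have hmem_v : v ∈ nums := List.getElem_mem _
    have hk1 : ((k : Int)) ∈ pvGroup nums v :=
      (mem_pvGroup nums v _).mpr ⟨k, by omega, rfl, he⟩
    have hk2 : ((k : Int) + 1) ∈ pvGroup nums v :=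
      (mem_pvGroup nums v _).mpr ⟨k + 1, hk, by push_cast; ring, rfl⟩
    have hpair : ((k : Int), (k : Int) + 1) ∈ (pvGroup nums v).zip (pvGroup nums v).tail := by
      apply zip_tail_mem_of_sorted _ (pvGroup_sorted nums v) _ _ hk1 hk2 (by omega)
      intro z hz
      obtain ⟨m, _, rfl, _⟩ := (mem_pvGroup nums v z).mp hz
      omega
    have := List.all_eq_true.mp (hall v hmem_v) _ hpair
    simp at this
  · intro hno v _
    apply List.all_eq_true.mpr
    rintro ⟨a, b⟩ hp
    obtain ⟨ha, hb, hab⟩ := zip_tail_sorted_facts _ (pvGroup_sorted nums v) a b hp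
    obtain ⟨ka, hka, rfl, hva⟩ := (mem_pvGroup nums v a).mp ha
    obtain ⟨kb, hkb, rfl, hvb⟩ := (mem_pvGroup nums v b).mp hb
    simp only [decide_eq_true_eq]
    by_contra hle
    have hkb1 : kb = ka + 1 := by omega
    subst hkb1
    have : pvAdj nums = true := (pvAdj_iff nums).mpr ⟨ka, hkb, by rw [hva, hvb]⟩
    rw [hno] at this
    exact Bool.false_ne_true this

-- the dictionary B builds: lookups and keys
lemma positions_getD (nums : List Int) (v : Int) :
    ((PySem.List.enumerate nums).foldl
      (fun d p => d.modify p.2 [] (fun l => l ++ [p.1])) PySem.Dict.empty).getD v []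
    = pvGroup nums v := by
  have hswap : (PySem.List.enumerate nums).foldl
      (fun (d : PySem.Dict Int (List Int)) p => d.modify p.2 [] (fun l => l ++ [p.1])) PySem.Dict.empty
    = (((PySem.List.enumerate nums).map (fun p => (p.2, p.1))).foldl
      (fun (d : PySem.Dict Int (List Int)) p => d.modify p.1 [] (fun l => l ++ [p.2])) PySem.Dict.empty) := by
    rw [List.foldl_map]
  rw [hswap, PySem.Dict.getD_foldl_modify_append]
  simp only [PySem.Dict.getD_empty, List.nil_append, List.filter_map, List.map_map]
  unfold pvGroup
  rfl

lemma countP_enumerate (xs : List Int) (s : Int) :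
    List.countP (fun p => p.2 == 7) (PySem.List.enumerate xs s) = List.countP (fun x => x == 7) xs := by
  induction xs generalizing s with
  | nil => simp [PySem.List.enumerate_nil]
  | cons a t ih => simp [PySem.List.enumerate_cons, List.countP_cons, ih]

lemma positions_count7 (nums : List Int) :
    (pvGroup nums 7).length = PySem.List.count nums 7 := by
  unfold pvGroup
  rw [List.length_map, ← List.countP_eq_length_filter, countP_enumerate]
  simp [PySem.List.count, List.count_eq_countP]

-- ===== VERDICT (by name: the statement is the Claim_ definition above) =====
theorem has_seven_spec : Claim_equal_has_seven := by
  intro nums _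
  unfold Spec_has_seven has_seven has_seven_alt
  rw [loop_char]
  simp only [PySem.List.slice_from_one]
  set P : PySem.Dict Int (List Int) := (PySem.List.enumerate nums).foldl
      (fun d p => d.modify p.2 [] (fun l => l ++ [p.1])) PySem.Dict.empty with hP
  have hnodup : P.keys.Nodup := by
    rw [hP]
    exact PySem.Dict.nodup_keys_foldl_modify_key (PySem.List.enumerate nums)
      (fun (p : Int × Int) => p.2) [] (fun _ p l => l ++ [p.1]) PySem.Dict.empty
      PySem.Dict.nodup_keys_empty
  have hget : ∀ v, P.getD v [] = pvGroup nums v := by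
    intro v; rw [hP]; exact positions_getD nums v
  have hkeys : ∀ v, v ∈ P.keys ↔ v ∈ nums := by
    intro v
    rw [hP]
    have hk := PySem.Dict.keys_foldl_modify_key (PySem.List.enumerate nums)
      (fun (p : Int × Int) => p.2) [] (fun _ p l => l ++ [p.1]) PySem.Dict.empty
    rw [hk, PySem.Set.mem_update, PySem.List.map_snd_enumerate]
    simp [PySem.Dict.keys_empty]
  rw [PySem.Dict.values_eq_map_keys P hnodup ([] : List Int), List.all_map]
  have hall_eq : (P.keys.all
      ((fun idxs => (idxs.zip idxs.tail).all fun p => decide (p.2 - p.1 > 1))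
        ∘ (fun k => P.getD k []))) = !pvAdj nums := by
    cases hA : pvAdj nums
    · simp only [Bool.not_false]
      apply List.all_eq_true.mpr
      intro v hv
      simpa [Function.comp, hget v, pvGapOK] using
        (groups_gap_iff nums).mpr hA v ((hkeys v).mp hv)
    · simp only [Bool.not_true]
      apply Bool.eq_false_iff.mpr
      intro hall
      have hgaps : ∀ v ∈ nums, pvGapOK (pvGroup nums v) = true := by
        intro v hv
        have := List.all_eq_true.mp hall v ((hkeys v).mpr hv)
        simpa [Function.comp, hget v, pvGapOK] using this
      rw [(groups_gap_iff nums).mp hgaps] at hA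
      exact Bool.false_ne_true hA
  rw [hall_eq, hget 7]
  by_cases h3 : (PySem.List.count nums 7 : Int) = 3
  · have h37 : ¬ ((pvGroup nums 7).length ≠ 3) := by
      rw [positions_count7]
      intro h; exact h (by exact_mod_cast h3)
    have h3' : (List.count 7 nums : Int) = 3 := by simpa [PySem.List.count] using h3
    cases hA : pvAdj nums
    · simp [h3', h37]
    · simp [h3', h37, hA]
  · have h37 : (pvGroup nums 7).length ≠ 3 := by
      rw [positions_count7]
      intro h; exact h3 (by exact_mod_cast h)
    have h3' : ¬ (List.count 7 nums : Int) = 3 := by simpa [PySem.List.count] using h3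
    simp [h3', h37]
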